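-- pv_equiv track=rewrite | github.com/junghwa1/opensorce-python | hw#5_9-12.py | base8
-- ===== SOURCE A (Python) =====
-- def base8(n,list8):
--     div_num=int(n)//8
--     num=int(n)%8
--     list8.append(num)
--     if div_num==0:
--         return list8
--     else:
--         return base8(div_num,list8)
-- ===== SOURCE B (Python) =====
-- def base8(n, list8):
--     n = int(n)
--     while n > 7:
--         list8.append(n % 8)
--         n //= 8
--     list8.append(n)
--     return list8
-- ===== Notes on version B (the rewrite author's own statement) =====
-- stated objective: simpler
-- what changed: Replaces the recursive divide-and-recurse with a plain while-loop that peels digits while n > 7 and appends the final digit once, with no recursion.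
import Mathlib
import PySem

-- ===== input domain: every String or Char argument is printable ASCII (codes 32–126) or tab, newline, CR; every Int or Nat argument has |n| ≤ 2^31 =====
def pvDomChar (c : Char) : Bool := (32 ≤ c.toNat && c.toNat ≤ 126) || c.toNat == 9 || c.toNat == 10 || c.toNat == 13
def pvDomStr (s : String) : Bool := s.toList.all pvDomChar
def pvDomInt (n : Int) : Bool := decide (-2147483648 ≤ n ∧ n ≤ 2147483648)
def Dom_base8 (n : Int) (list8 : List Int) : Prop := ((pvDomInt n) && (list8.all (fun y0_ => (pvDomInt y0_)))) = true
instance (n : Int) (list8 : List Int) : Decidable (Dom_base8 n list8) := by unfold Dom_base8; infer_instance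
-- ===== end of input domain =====

-- B replaces A's recursion by a while-loop that peels digits while n > 7 and appends the
-- final digit once (simpler; return value AND the in-place append effect coincide on Pre_).

-- ===== PORT A =====
-- A recurses on div_num; on n ≥ 0 the quotient chain is finite, so a fuel of n.toNat + 1
-- steps (a totality guard only, never reached on Pre_) transcribes the recursion exactly.
def base8Go : Nat → Int → List Int → List Int
  | 0, _, list8 => list8
  | fuel+1, n, list8 =>
    let div_num := PySem.Int.floordiv n 8
    let num := PySem.Int.mod n 8
    let list8' := list8 ++ [num]
    if div_num == 0 then list8' else base8Go fuel div_num list8'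

def base8 (n : Int) (list8 : List Int) : List Int := base8Go (n.toNat + 1) n list8

-- ===== PORT B =====
def base8AltLoop (n : Int) (list8 : List Int) : List Int :=
  if _h : 7 < n then
    base8AltLoop (PySem.Int.floordiv n 8) (list8 ++ [PySem.Int.mod n 8])
  else
    list8 ++ [n]
termination_by n.toNat
decreasing_by rw [PySem.Int.floordiv_eq_ediv_of_pos (by omega)]; omega

def base8_alt (n : Int) (list8 : List Int) : List Int := base8AltLoop n list8

-- ===== PRECONDITION & SPEC =====
-- Pre_ excludes n < 0, where A recurses forever on the same quotient (RecursionError).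
def Pre_base8 (n : Int) (list8 : List Int) : Prop := 0 ≤ n
instance (n : Int) (list8 : List Int) : Decidable (Pre_base8 n list8) := by unfold Pre_base8; infer_instance
def pvWitness_base8 : Int × List Int := (5, [])

def Spec_base8 (n : Int) (list8 : List Int) (out : List Int) : Prop := out = base8_alt n list8
instance (n : Int) (list8 : List Int) (out : List Int) : Decidable (Spec_base8 n list8 out) := by unfold Spec_base8; infer_instance

-- ===== CLAIM (what is proved, stated in full; the proofs are below) =====
def Claim_equal_base8 : Prop := ∀ (n : Int) (list8 : List Int), Dom_base8 n list8 → Pre_base8 n list8 → Spec_base8 n list8 (base8 n list8)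

-- ===== LEMMAS AND PROOFS =====
theorem base8Go_eq_loop (fuel : Nat) : ∀ (n : Int) (list8 : List Int),
    0 ≤ n → n.toNat < fuel → base8Go fuel n list8 = base8AltLoop n list8 := by
  induction fuel with
  | zero => intro n list8 _ h; omega
  | succ fuel ih =>
    intro n list8 hn hlt
    rw [base8AltLoop]
    simp only [base8Go,
      PySem.Int.floordiv_eq_ediv_of_pos (show (0:Int) < 8 by omega),
      PySem.Int.mod_eq_emod_of_pos (show (0:Int) < 8 by omega)]
    by_cases h7 : 7 < n
    · have hne : ¬ (n / 8 == 0) = true := by simp; omega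
      rw [if_neg hne, dif_pos h7]
      exact ih _ _ (by omega) (by omega)
    · have hz : (n / 8 == 0) = true := by simp; omega
      rw [if_pos hz, dif_neg h7]
      have : n % 8 = n := by omega
      rw [this]

-- ===== VERDICT (by name: the statement is the Claim_ definition above) =====
theorem base8_spec : Claim_equal_base8 := by
  intro n list8 _ hpre
  unfold Spec_base8 base8 base8_alt
  exact base8Go_eq_loop _ _ _ hpre (by omega)
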